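-- pv_equiv track=rewrite | github.com/HolmanDev/Fractal-Garden | src/main.py | path_index
-- ===== SOURCE A (Python) =====
-- def path_index(path):
--     i = 0
--     order = 0
--     for c in path:
--         power = 5**order
--         if c == 'f': i = i + power
--         elif c == 'l': i = i + 2*power
--         elif c == 'L': i = i + 3*power
--         elif c == 'r': i = i + 4*power
--         else: i = i + 5*power
--         order += 1
--     return i
-- ===== SOURCE B (Python) =====
-- _DIGIT = {'f': 1, 'l': 2, 'L': 3, 'r': 4}
--
-- def path_index(path):
--     i = 0
--     for c in reversed(path):
--         i = i * 5 + _DIGIT.get(c, 5)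
--     return i
-- ===== Notes on version B (the rewrite author's own statement) =====
-- stated objective: faster
-- what changed: Replaced the per-character 5**order power table and if/elif weighted sum with Horner's method: a single reverse pass with one multiply-accumulate i = i*5 + digit(c), digits taken from a dict with default 5.
import Mathlib
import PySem

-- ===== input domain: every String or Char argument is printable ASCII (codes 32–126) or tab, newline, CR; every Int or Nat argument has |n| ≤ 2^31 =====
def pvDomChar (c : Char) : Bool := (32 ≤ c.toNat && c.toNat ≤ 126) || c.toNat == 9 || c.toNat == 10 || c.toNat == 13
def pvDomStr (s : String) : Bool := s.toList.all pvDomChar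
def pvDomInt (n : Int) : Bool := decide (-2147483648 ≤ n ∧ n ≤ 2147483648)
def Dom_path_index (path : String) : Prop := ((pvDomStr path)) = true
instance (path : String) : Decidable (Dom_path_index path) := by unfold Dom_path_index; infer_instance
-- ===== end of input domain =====

-- B replaces A's per-character 5**order power table and weighted if/elif sum with
-- Horner's method (one reverse pass, i = i*5 + digit c, digits from a dict); idiomatic.


-- ===== PORT A =====
-- literal transliteration: state (i, order); each step computes power = 5**order and
-- adds the weighted term chosen by the if/elif chain, then increments order
def path_index (path : String) : Int :=
  (path.toList.foldl
    (fun (st : Int × Nat) c =>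
      let i := st.1
      let order := st.2
      let power : Int := (5 : Int) ^ order
      let i :=
        if c = 'f' then i + power
        else if c = 'l' then i + 2 * power
        else if c = 'L' then i + 3 * power
        else if c = 'r' then i + 4 * power
        else i + 5 * power
      (i, order + 1))
    (0, 0)).1

-- ===== PORT B =====
-- Source B's module-level _DIGIT dict; .get(c, 5)
def pathDigit (c : Char) : Int :=
  PySem.Dict.getD (PySem.Dict.ofList [('f', (1 : Int)), ('l', 2), ('L', 3), ('r', 4)]) c 5

-- Source B: single accumulator over reversed(path)
def path_index_alt (path : String) : Int :=
  path.toList.reverse.foldl (fun i c => i * 5 + pathDigit c) 0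

-- ===== PRECONDITION & SPEC =====
def Spec_path_index (path : String) (out : Int) : Prop := out = path_index_alt path
instance (path : String) (out : Int) : Decidable (Spec_path_index path out) := by unfold Spec_path_index; infer_instance

-- ===== CLAIM (what is proved, stated in full; the proofs are below) =====
def Claim_equal_path_index : Prop := ∀ (path : String), Dom_path_index path → Spec_path_index path (path_index path)

-- ===== LEMMAS AND PROOFS =====

-- the dict lookup with default 5 agrees with A's branch structure
lemma pathDigit_eq (c : Char) : pathDigit c =
    if c = 'f' then 1 else if c = 'l' then 2 else if c = 'L' then 3
    else if c = 'r' then 4 else 5 := by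
  have e : (PySem.Dict.ofList [('f', (1 : Int)), ('l', 2), ('L', 3), ('r', 4)]) =
      PySem.Dict.mk [('f', (1 : Int)), ('l', 2), ('L', 3), ('r', 4)] := by decide
  rw [pathDigit, e, PySem.Dict.getD_eq_get?_getD]
  simp only [PySem.Dict.get?_mk_cons, beq_iff_eq]
  split_ifs <;> first
    | rfl
    | simp_all [eq_comm]

-- A's branch chain adds pathDigit c * power
lemma digit_branches (i power : Int) (c : Char) :
    (if c = 'f' then i + power
     else if c = 'l' then i + 2 * power
     else if c = 'L' then i + 3 * power
     else if c = 'r' then i + 4 * power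
     else i + 5 * power) = i + pathDigit c * power := by
  rw [pathDigit_eq]; split_ifs <;> ring

-- the base-5 value of a char list, least-significant digit first
def horner (l : List Char) : Int := l.foldr (fun c a => pathDigit c + 5 * a) 0

-- invariant of A's loop
lemma foldA (l : List Char) (i : Int) (o : Nat) :
    (l.foldl
      (fun (st : Int × Nat) c =>
        let i := st.1
        let order := st.2
        let power : Int := (5 : Int) ^ order
        let i :=
          if c = 'f' then i + power
          else if c = 'l' then i + 2 * power
          else if c = 'L' then i + 3 * power
          else if c = 'r' then i + 4 * power
          else i + 5 * power
        (i, order + 1))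
      (i, o)).1 = i + (5 : Int) ^ o * horner l := by
  induction l generalizing i o with
  | nil => simp [horner]
  | cons c t ih =>
    simp only [List.foldl_cons]
    rw [ih, digit_branches]
    simp [horner, pow_succ]
    ring

-- B's reverse multiply-accumulate computes the same base-5 value
lemma foldB (l : List Char) :
    l.reverse.foldl (fun i c => i * 5 + pathDigit c) 0 = horner l := by
  rw [List.foldl_reverse]
  induction l with
  | nil => simp [horner]
  | cons c t ih => simp only [horner, List.foldr] at ih ⊢; rw [ih]; ring

-- ===== VERDICT (by name: the statement is the Claim_ definition above) =====
theorem path_index_spec : Claim_equal_path_index := by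
  intro path _
  unfold Spec_path_index path_index path_index_alt
  rw [foldA, foldB]
  simp
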